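-- pv_equiv track=rewrite | github.com/colinxy/ProjectEuler | Python/project_euler126.py | cover_cuboid_top
-- ===== SOURCE A (Python) =====
-- def cover_cuboid_top(cuboid, top):
--     surface = 2 * (cuboid[0]*cuboid[1] + cuboid[0]*cuboid[2] + cuboid[1]*cuboid[2])
--     edge = 4 * sum(cuboid)
--     layers = []
--
--     curr = surface
--     diff = edge
--     while curr <= top:
--         layers.append(curr)
--         curr += diff
--         diff += 8
--
--     return layers
-- ===== SOURCE B (Python) =====
-- def cover_cuboid_top(cuboid, top):
--     # Two phases: count the layers, then produce each value from the closed form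
--     # val(k) = surface + k*edge + 4*k*(k-1)  (no running accumulators).
--     a, b, c = cuboid[0], cuboid[1], cuboid[2]
--     surface = 2 * (a*b + a*c + b*c)
--     edge = 4 * sum(cuboid)
--     n = 0
--     while surface + n*edge + 4*n*(n-1) <= top:
--         n += 1
--     return [surface + k*edge + 4*k*(k-1) for k in range(n)]
-- ===== Notes on version B (the rewrite author's own statement) =====
-- stated objective: alternative
-- what changed: B replaces the threaded curr/diff running-difference accumulators by the closed form val(k)=surface+k*edge+4k(k-1): it first counts the layers with that formula and then produces the list as a comprehension over range(n), so no state is carried between elements.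
import Mathlib
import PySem

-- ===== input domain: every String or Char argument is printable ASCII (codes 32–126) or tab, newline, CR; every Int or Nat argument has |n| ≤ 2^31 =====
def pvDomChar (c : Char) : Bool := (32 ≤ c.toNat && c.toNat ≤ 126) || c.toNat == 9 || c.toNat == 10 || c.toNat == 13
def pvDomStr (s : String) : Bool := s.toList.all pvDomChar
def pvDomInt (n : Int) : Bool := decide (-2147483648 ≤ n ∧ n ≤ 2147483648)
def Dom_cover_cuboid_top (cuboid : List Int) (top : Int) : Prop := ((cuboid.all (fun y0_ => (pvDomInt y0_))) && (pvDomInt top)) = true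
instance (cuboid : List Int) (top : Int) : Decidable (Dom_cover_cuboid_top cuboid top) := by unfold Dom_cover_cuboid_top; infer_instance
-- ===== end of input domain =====

-- B lists the same cover-layer counts without the running curr/diff accumulators:
-- it counts layers with the closed form val(k) = surface + k*edge + 4k(k-1) and then
-- maps that formula over range(n) (alternative decomposition, same cost).


-- fuel bound shared by both loops, used ONLY as a totality guard: starting from
-- value surface and difference edge, the running value at step k is
-- surface + k*edge + 4k(k-1) > top for every k ≥ pvBound, so the loops always
-- exit the `curr ≤ top` test before the fuel runs out.
def pvBoundA (surface edge top : Int) : Int := |surface| + |edge| + |top| + 2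

-- ===== PORT A =====
-- the while loop of A: state (curr, diff); curr += diff; diff += 8
def pvLoopA (fuel : Nat) (top curr diff : Int) : List Int :=
  match fuel with
  | 0 => []
  | f + 1 => if curr ≤ top then curr :: pvLoopA f top (curr + diff) (diff + 8) else []

def cover_cuboid_top (cuboid : List Int) (top : Int) : List Int :=
  match PySem.List.pyGet? cuboid 0, PySem.List.pyGet? cuboid 1, PySem.List.pyGet? cuboid 2 with
  | some a, some b, some c =>
      let surface := 2 * (a * b + a * c + b * c)
      let edge := 4 * cuboid.sum
      pvLoopA ((pvBoundA surface edge top).toNat + 1) top surface edge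
  | _, _, _ => []   -- IndexError (fewer than 3 entries): excluded by Pre_

-- ===== PORT B =====
-- B's own copy of the fuel bound (kept separate from A's so the two ports share nothing)
def pvBoundB (surface edge top : Int) : Int := |surface| + |edge| + |top| + 2

-- closed form for the k-th layer count
def pvVal (surface edge k : Int) : Int := surface + k * edge + 4 * k * (k - 1)

-- the counting loop of B: first k (from the start value) with val(k) > top
def pvCount (fuel : Nat) (surface edge top k : Int) : Int :=
  match fuel with
  | 0 => k
  | f + 1 => if pvVal surface edge k ≤ top then pvCount f surface edge top (k + 1) else k

def cover_cuboid_top_alt (cuboid : List Int) (top : Int) : List Int :=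
  -- IndexError (fewer than 3 entries) is excluded by Pre_; the `none` arms return []
  match PySem.List.pyGet? cuboid 0 with
  | none => []
  | some a =>
    match PySem.List.pyGet? cuboid 1 with
    | none => []
    | some b =>
      match PySem.List.pyGet? cuboid 2 with
      | none => []
      | some c =>
        let surface := 2 * (a * b + a * c + b * c)
        let edge := 4 * cuboid.sum
        (PySem.List.pyRange 0 (pvCount ((pvBoundB surface edge top).toNat + 1) surface edge top 0) 1).map
          (fun k => pvVal surface edge k)

-- ===== PRECONDITION & SPEC =====
-- A raises IndexError on lists with fewer than 3 elements; exactly those are excluded.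
def Pre_cover_cuboid_top (cuboid : List Int) (top : Int) : Prop := 3 ≤ cuboid.length
instance (cuboid : List Int) (top : Int) : Decidable (Pre_cover_cuboid_top cuboid top) := by unfold Pre_cover_cuboid_top; infer_instance
def pvWitness_cover_cuboid_top : List Int × Int := ([1, 1, 1], 30)

def Spec_cover_cuboid_top (cuboid : List Int) (top : Int) (out : List Int) : Prop := out = cover_cuboid_top_alt cuboid top
instance (cuboid : List Int) (top : Int) (out : List Int) : Decidable (Spec_cover_cuboid_top cuboid top out) := by unfold Spec_cover_cuboid_top; infer_instance

-- ===== CLAIM (what is proved, stated in full; the proofs are below) =====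
def Claim_equal_cover_cuboid_top : Prop := ∀ (cuboid : List Int) (top : Int), Dom_cover_cuboid_top cuboid top → Pre_cover_cuboid_top cuboid top → Spec_cover_cuboid_top cuboid top (cover_cuboid_top cuboid top)

-- ===== LEMMAS AND PROOFS =====

theorem pvBoundA_eq_pvBoundB (surface edge top : Int) :
    pvBoundA surface edge top = pvBoundB surface edge top := rfl

theorem pvCount_ge (surface edge top : Int) :
    ∀ (fuel : Nat) (k : Int), k ≤ pvCount fuel surface edge top k := by
  intro fuel
  induction fuel with
  | zero => intro k; simp [pvCount]
  | succ f ih =>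
      intro k
      rw [pvCount]
      split
      · have := ih (k + 1); omega
      · omega

-- both loops run on the same fuel and test the same condition at each step, so
-- the lists agree for EVERY fuel value (the running value of A's loop at step k
-- is exactly pvVal surface edge k).
theorem pvLoopA_eq (surface edge top : Int) :
    ∀ (fuel : Nat) (k : Int),
      pvLoopA fuel top (pvVal surface edge k) (edge + 8 * k)
        = (PySem.List.pyRange k (pvCount fuel surface edge top k) 1).map
            (fun j => pvVal surface edge j) := by
  intro fuel
  induction fuel with
  | zero => intro k; simp [pvLoopA, pvCount]
  | succ f ih =>
      intro k
      rw [pvLoopA, pvCount]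
      by_cases h : pvVal surface edge k ≤ top
      · rw [if_pos h, if_pos h]
        have h1 : pvVal surface edge k + (edge + 8 * k) = pvVal surface edge (k + 1) := by
          unfold pvVal; ring
        have h2 : edge + 8 * k + 8 = edge + 8 * (k + 1) := by ring
        rw [h1, h2, ih (k + 1)]
        have hk : k < pvCount f surface edge top (k + 1) := by
          have := pvCount_ge surface edge top f (k + 1); omega
        rw [PySem.List.pyRange_one_cons hk, List.map_cons]
      · rw [if_neg h, if_neg h]
        simp

-- ===== VERDICT (by name: the statement is the Claim_ definition above) =====
theorem cover_cuboid_top_spec : Claim_equal_cover_cuboid_top := by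
  intro cuboid top _ hPre
  unfold Spec_cover_cuboid_top
  match cuboid, hPre with
  | a :: b :: c :: rest, _ =>
    show cover_cuboid_top (a :: b :: c :: rest) top = cover_cuboid_top_alt (a :: b :: c :: rest) top
    have hg0 : PySem.List.pyGet? (a :: b :: c :: rest) 0 = some a := by
      simp only [PySem.List.pyGet?, PySem.List.pyIdx?]
      repeat' split
      all_goals first | (exfalso; simp only [List.length_cons] at *; omega) | simp
    have hg1 : PySem.List.pyGet? (a :: b :: c :: rest) 1 = some b := by
      simp only [PySem.List.pyGet?, PySem.List.pyIdx?]
      repeat' split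
      all_goals first | (exfalso; simp only [List.length_cons] at *; omega) | simp
    have hg2 : PySem.List.pyGet? (a :: b :: c :: rest) 2 = some c := by
      simp only [PySem.List.pyGet?, PySem.List.pyIdx?]
      repeat' split
      all_goals first | (exfalso; simp only [List.length_cons] at *; omega) | simp
    rw [cover_cuboid_top, cover_cuboid_top_alt, hg0, hg1, hg2]
    have h0 : (2 * (a * b + a * c + b * c) : Int)
        = pvVal (2 * (a * b + a * c + b * c)) (4 * (a :: b :: c :: rest).sum) 0 := by
      unfold pvVal; ring
    have h1 : (4 * (a :: b :: c :: rest).sum : Int)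
        = 4 * (a :: b :: c :: rest).sum + 8 * 0 := by ring
    calc pvLoopA ((pvBoundA (2 * (a * b + a * c + b * c)) (4 * (a :: b :: c :: rest).sum) top).toNat + 1)
            top (2 * (a * b + a * c + b * c)) (4 * (a :: b :: c :: rest).sum)
        = pvLoopA ((pvBoundA (2 * (a * b + a * c + b * c)) (4 * (a :: b :: c :: rest).sum) top).toNat + 1)
            top (pvVal (2 * (a * b + a * c + b * c)) (4 * (a :: b :: c :: rest).sum) 0)
            (4 * (a :: b :: c :: rest).sum + 8 * 0) := by rw [← h0, ← h1]
      _ = _ := by rw [pvBoundA_eq_pvBoundB, pvLoopA_eq]
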